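-- pv_equiv track=rewrite | github.com/DRMF/DRMF-Seeding-Project | tex2wiki/src/tex2wiki.py | get_macro_name
-- ===== SOURCE A (Python) =====
-- def get_macro_name(macro):
--     # type: (str) -> str
--     """Obtains the macro name."""
--     macro_name = ""
--     for ch in macro:
--         if ch.isalpha() or ch == "\\":
--             macro_name += ch
--         elif ch in ["@", "{", "["]:
--             break
--
--     return macro_name
-- ===== SOURCE B (Python) =====
-- def get_macro_name(macro):
--     # type: (str) -> str
--     """Obtains the macro name (boundary-finding pass, then a filtering pass)."""
--     end = len(macro)
--     for i, ch in enumerate(macro):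
--         if ch in "@{[":
--             end = i
--             break
--     return "".join(ch for ch in macro[:end] if ch.isalpha() or ch == "\\")
-- ===== Notes on version B (the rewrite author's own statement) =====
-- stated objective: alternative
-- what changed: Replaces the single accumulate-with-break scan by two phases: first find the index of the first terminator '@'/'{'/'[', then filter the alpha/backslash characters out of that prefix.
import Mathlib
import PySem

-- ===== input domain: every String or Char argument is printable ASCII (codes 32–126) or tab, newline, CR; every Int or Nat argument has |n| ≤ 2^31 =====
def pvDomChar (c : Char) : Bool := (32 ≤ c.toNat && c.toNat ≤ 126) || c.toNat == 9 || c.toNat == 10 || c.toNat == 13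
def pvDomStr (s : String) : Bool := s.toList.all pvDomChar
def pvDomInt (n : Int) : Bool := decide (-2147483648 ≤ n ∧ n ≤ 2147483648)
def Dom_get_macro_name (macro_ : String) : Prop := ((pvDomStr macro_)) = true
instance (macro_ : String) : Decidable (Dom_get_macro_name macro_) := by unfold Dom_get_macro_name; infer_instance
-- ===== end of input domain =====

-- B replaces A's single accumulate-with-break scan by a boundary-finding pass followed by a
-- filtering pass over the prefix (objective: alternative decomposition, same cost).

-- ===== PORT A =====
-- the for-loop with accumulator and break, step for step
def pvALoop : List Char → List Char → List Char
  | [], acc => acc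
  | ch :: rest, acc =>
    if PySem.Chars.isalpha ch || ch == '\\' then pvALoop rest (acc ++ [ch])
    else if ch == '@' || ch == '{' || ch == '[' then acc
    else pvALoop rest acc

def get_macro_name (macro_ : String) : String :=
  String.ofList (pvALoop macro_.toList [])

-- ===== PORT B =====
-- first pass of Source B: 'end = len(macro); for i, ch in enumerate(macro): if ch in "@{[": end = i; break'
def pvBFindEnd : List Char → Nat → Nat → Nat
  | [], _, total => total
  | ch :: rest, i, total =>
    if ch == '@' || ch == '{' || ch == '[' then i
    else pvBFindEnd rest (i + 1) total

def get_macro_name_alt (macro_ : String) : String :=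
  -- end := first pass; then ''.join(ch for ch in macro[:end] if ch.isalpha() or ch == '\\')
  String.ofList ((PySem.Chars.slice macro_.toList none
      (some ((pvBFindEnd macro_.toList 0 macro_.toList.length : Nat) : Int))).filter
    (fun ch => PySem.Chars.isalpha ch || ch == '\\'))

-- ===== PRECONDITION & SPEC =====
def Spec_get_macro_name (macro_ : String) (out : String) : Prop := out = get_macro_name_alt macro_
instance (macro_ : String) (out : String) : Decidable (Spec_get_macro_name macro_ out) := by unfold Spec_get_macro_name; infer_instance

-- ===== CLAIM (what is proved, stated in full; the proofs are below) =====
def Claim_equal_get_macro_name : Prop := ∀ (macro_ : String), Dom_get_macro_name macro_ → Spec_get_macro_name macro_ (get_macro_name macro_)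

-- ===== LEMMAS AND PROOFS =====

def pvNotTerm (ch : Char) : Bool := !(ch == '@' || ch == '{' || ch == '[')

-- A's loop collects the alpha/backslash characters of the prefix before the first terminator
lemma pvALoop_eq (l : List Char) (acc : List Char) :
    pvALoop l acc = acc ++ (l.takeWhile pvNotTerm).filter
      (fun ch => PySem.Chars.isalpha ch || ch == '\\') := by
  induction l generalizing acc with
  | nil => simp [pvALoop]
  | cons ch rest ih =>
    by_cases hterm : (ch == '@' || ch == '{' || ch == '[') = true
    · have halpha : (PySem.Chars.isalpha ch || ch == '\\') = false := by
        rcases Bool.or_eq_true_iff.mp hterm with h | h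
        · rcases Bool.or_eq_true_iff.mp h with h | h <;> (rw [beq_iff_eq.mp h]; decide)
        · rw [beq_iff_eq.mp h]; decide
      simp [pvALoop, halpha, hterm, List.takeWhile, pvNotTerm]
    · have hnt : pvNotTerm ch = true := by simp [pvNotTerm, hterm]
      by_cases halpha : (PySem.Chars.isalpha ch || ch == '\\') = true
      · simp [pvALoop, halpha, List.takeWhile, hnt, ih]
      · simp [pvALoop, halpha, hterm, List.takeWhile, hnt, ih]

-- B's first pass returns the length of the prefix before the first terminator
lemma pvBFindEnd_eq (l : List Char) (i : Nat) :
    pvBFindEnd l i (i + l.length) = i + (l.takeWhile pvNotTerm).length := by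
  induction l generalizing i with
  | nil => simp [pvBFindEnd]
  | cons ch rest ih =>
    by_cases hterm : (ch == '@' || ch == '{' || ch == '[') = true
    · simp [pvBFindEnd, hterm, List.takeWhile, pvNotTerm]
    · have hnt : pvNotTerm ch = true := by simp [pvNotTerm, hterm]
      have hstep : pvBFindEnd (ch :: rest) i (i + (ch :: rest).length)
          = pvBFindEnd rest (i + 1) (i + (rest.length + 1)) := by
        simp [pvBFindEnd, hterm]
      rw [hstep, show i + (rest.length + 1) = (i + 1) + rest.length from by omega, ih]
      simp [List.takeWhile, hnt]
      omega

-- ===== VERDICT (by name: the statement is the Claim_ definition above) =====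
theorem get_macro_name_spec : Claim_equal_get_macro_name := by
  intro macro_ _
  unfold Spec_get_macro_name get_macro_name get_macro_name_alt
  have he : pvBFindEnd macro_.toList 0 macro_.toList.length
      = (macro_.toList.takeWhile pvNotTerm).length := by
    simpa using pvBFindEnd_eq macro_.toList 0
  rw [he, pvALoop_eq]
  rw [show PySem.Chars.slice macro_.toList none
        (some ((List.takeWhile pvNotTerm macro_.toList).length : Int))
      = macro_.toList.take (List.takeWhile pvNotTerm macro_.toList).length from
    PySem.List.slice_to_natCast _ _]
  rw [(List.prefix_iff_eq_take.mp (List.takeWhile_prefix pvNotTerm)).symm]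
  simp
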